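-- pv_equiv track=rewrite | github.com/Yeswolo/CoMet | gamelist/WhoIsUndercover/game.py | find_most_voted_player
-- ===== SOURCE A (Python) =====
-- def find_most_voted_player(votes: dict):
--
--     if not votes:
--         return None
--
--     max_votes = max(votes.values())
--     if max_votes == 0:
--         return None
--
--     most_voted_players = [player_id for player_id, vote in votes.items() if vote == max_votes]
--     if len(most_voted_players) > 1:
--         return None
--     else:
--         return most_voted_players[0]
-- ===== SOURCE B (Python) =====
-- def find_most_voted_player(votes: dict):
--     best_value = None
--     best_player = None
--     tie_count = 0
--     for player, value in votes.items():
--         if best_value is None or value > best_value: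
--             best_value, best_player, tie_count = value, player, 1
--         elif value == best_value:
--             tie_count += 1
--     if best_value is None or best_value == 0 or tie_count > 1:
--         return None
--     return best_player
-- ===== Notes on version B (the rewrite author's own statement) =====
-- stated objective: alternative
-- what changed: Replaces A's three passes (max over values, filter for the maximal players, length/indexing) with a single fold that maintains the running best value, its first holder, and a tie counter.
import Mathlib
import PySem

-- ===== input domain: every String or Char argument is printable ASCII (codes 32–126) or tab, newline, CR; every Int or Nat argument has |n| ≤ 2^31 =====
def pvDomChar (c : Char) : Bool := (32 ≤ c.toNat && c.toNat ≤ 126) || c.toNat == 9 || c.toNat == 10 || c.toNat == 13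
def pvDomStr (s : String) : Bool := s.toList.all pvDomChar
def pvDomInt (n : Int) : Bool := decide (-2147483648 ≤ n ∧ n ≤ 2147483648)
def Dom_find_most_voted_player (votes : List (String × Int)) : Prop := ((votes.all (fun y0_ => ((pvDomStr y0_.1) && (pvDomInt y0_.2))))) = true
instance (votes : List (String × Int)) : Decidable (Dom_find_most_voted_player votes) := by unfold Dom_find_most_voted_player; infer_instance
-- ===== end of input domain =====

-- B fuses A's separate passes (max over values, filter for the maximal players, indexing) into one
-- accumulating scan; objective: alternative single-pass decomposition (same asymptotic cost).

-- ===== PORT A =====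
def find_most_voted_player (votes : List (String × Int)) : Option String :=
  if votes = [] then none
  else
    match PySem.List.max? (votes.map (·.2)) (fun y => y) with
    | none => none   -- unreachable: votes ≠ []
    | some max_votes =>
      if max_votes = 0 then none
      else
        let most_voted_players := (votes.filter (fun p => p.2 = max_votes)).map (·.1)
        if (most_voted_players.length : Int) > 1 then none
        else PySem.List.pyGet? most_voted_players 0

-- ===== PORT B =====
-- one loop step of Source B: (best_value, best_player, tie_count) updated by one (player, value) item
def fmvpStep (st : Option Int × Option String × Int) (pv : String × Int) :
    Option Int × Option String × Int :=
  match st.1 with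
  | none => (some pv.2, some pv.1, 1)
  | some bv =>
    if bv < pv.2 then (some pv.2, some pv.1, 1)
    else if pv.2 = bv then (st.1, st.2.1, st.2.2 + 1)
    else st

def find_most_voted_player_alt (votes : List (String × Int)) : Option String :=
  let st := votes.foldl fmvpStep (none, none, 0)
  match st.1 with
  | none => none
  | some bv => if bv = 0 then none else if st.2.2 > 1 then none else st.2.1

-- ===== PRECONDITION & SPEC =====
def Spec_find_most_voted_player (votes : List (String × Int)) (out : Option String) : Prop := out = find_most_voted_player_alt votes
instance (votes : List (String × Int)) (out : Option String) : Decidable (Spec_find_most_voted_player votes out) := by unfold Spec_find_most_voted_player; infer_instance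

-- ===== CLAIM (what is proved, stated in full; the proofs are below) =====
def Claim_equal_find_most_voted_player : Prop := ∀ (votes : List (String × Int)), Dom_find_most_voted_player votes → Spec_find_most_voted_player votes (find_most_voted_player votes)

-- ===== LEMMAS AND PROOFS =====

-- running max of values, started at b
def fmvpMax (xs : List (String × Int)) (b : Int) : Int := xs.foldl (fun a p => max a p.2) b

-- first player in xs whose value is m (default "")
def fmvpFirst (xs : List (String × Int)) (m : Int) : String :=
  match xs.find? (fun p => p.2 = m) with
  | some p => p.1
  | none => ""

-- number of players in xs whose value is m
def fmvpCnt (xs : List (String × Int)) (m : Int) : Int :=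
  ((xs.filter (fun p => p.2 = m)).length : Int)

theorem fmvpMax_cons (p : String × Int) (xs : List (String × Int)) (b : Int) :
    fmvpMax (p :: xs) b = fmvpMax xs (max b p.2) := rfl

theorem le_fmvpMax (xs : List (String × Int)) (b : Int) : b ≤ fmvpMax xs b := by
  induction xs generalizing b with
  | nil => exact le_refl b
  | cons p t ih => exact le_trans (le_max_left b p.2) (ih (max b p.2))

theorem fmvpMax_exists (xs : List (String × Int)) (b : Int) :
    fmvpMax xs b = b ∨ ∃ p ∈ xs, p.2 = fmvpMax xs b := by
  induction xs generalizing b with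
  | nil => exact Or.inl rfl
  | cons q xs ih =>
    rw [fmvpMax_cons]
    rcases ih (max b q.2) with h | ⟨p, hp, hpv⟩
    · rcases max_choice b q.2 with hm | hm
      · exact Or.inl (by rw [h, hm])
      · exact Or.inr ⟨q, List.mem_cons_self, by rw [h, hm]⟩
    · exact Or.inr ⟨p, List.mem_cons_of_mem q hp, hpv⟩

theorem fmvpFirst_cons_pos {p : String × Int} {m : Int} (xs : List (String × Int))
    (h : p.2 = m) : fmvpFirst (p :: xs) m = p.1 := by
  simp [fmvpFirst, h]

theorem fmvpFirst_cons_neg {p : String × Int} {m : Int} (xs : List (String × Int))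
    (h : ¬ p.2 = m) : fmvpFirst (p :: xs) m = fmvpFirst xs m := by
  simp [fmvpFirst, h]

theorem fmvpCnt_cons_pos {p : String × Int} {m : Int} (xs : List (String × Int))
    (h : p.2 = m) : fmvpCnt (p :: xs) m = 1 + fmvpCnt xs m := by
  simp [fmvpCnt, h]; omega

theorem fmvpCnt_cons_neg {p : String × Int} {m : Int} (xs : List (String × Int))
    (h : ¬ p.2 = m) : fmvpCnt (p :: xs) m = fmvpCnt xs m := by
  simp [fmvpCnt, h]

-- the invariant of Source B's loop, for a state reached after at least one item
theorem fmvp_fold_inv (xs : List (String × Int)) (bv : Int) (bp : String) (t : Int) :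
    xs.foldl fmvpStep (some bv, some bp, t) =
      (some (fmvpMax xs bv),
       some (if fmvpMax xs bv = bv then bp else fmvpFirst xs (fmvpMax xs bv)),
       (if fmvpMax xs bv = bv then t else 0) + fmvpCnt xs (fmvpMax xs bv)) := by
  induction xs generalizing bv bp t with
  | nil => simp [fmvpMax, fmvpCnt]
  | cons p xs ih =>
    by_cases h1 : bv < p.2
    · -- strict improvement: state resets to (p.2, p.1, 1)
      have hMM : fmvpMax (p :: xs) bv = fmvpMax xs p.2 := by
        rw [fmvpMax_cons, max_eq_right (le_of_lt h1)]
      simp only [List.foldl_cons, fmvpStep, if_pos h1]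
      rw [ih p.2 p.1 1, hMM]
      have hNbv : ¬ fmvpMax xs p.2 = bv := by
        have := le_fmvpMax xs p.2; omega
      rw [if_neg hNbv, if_neg hNbv]
      by_cases h2 : fmvpMax xs p.2 = p.2
      · rw [if_pos h2, if_pos h2,
            fmvpFirst_cons_pos xs h2.symm, fmvpCnt_cons_pos xs h2.symm]
        congr 2
        omega
      · rw [if_neg h2, if_neg h2,
            fmvpFirst_cons_neg xs (fun h => h2 h.symm),
            fmvpCnt_cons_neg xs (fun h => h2 h.symm)]
    · by_cases h2 : p.2 = bv
      · -- equal to the best so far: tie_count increments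
        have hMM : fmvpMax (p :: xs) bv = fmvpMax xs bv := by
          rw [fmvpMax_cons, max_eq_left (le_of_not_gt h1)]
        simp only [List.foldl_cons, fmvpStep, if_neg h1, if_pos h2]
        rw [ih bv bp (t + 1), hMM]
        by_cases h3 : fmvpMax xs bv = bv
        · have hpm : p.2 = fmvpMax xs bv := by omega
          rw [fmvpCnt_cons_pos xs hpm]
          simp only [if_pos h3]
          rw [add_assoc]
        · have hpm : ¬ p.2 = fmvpMax xs bv := by
            have := le_fmvpMax xs bv; omega
          rw [fmvpFirst_cons_neg xs hpm, fmvpCnt_cons_neg xs hpm]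
          simp only [if_neg h3]
      · -- strictly smaller: state unchanged
        have hlt2 : p.2 < bv := lt_of_le_of_ne (le_of_not_gt h1) h2
        have hMM : fmvpMax (p :: xs) bv = fmvpMax xs bv := by
          rw [fmvpMax_cons, max_eq_left (le_of_not_gt h1)]
        simp only [List.foldl_cons, fmvpStep, if_neg h1, if_neg h2]
        rw [ih bv bp t, hMM]
        have hpm : ¬ p.2 = fmvpMax xs bv := by
          have := le_fmvpMax xs bv; omega
        rw [fmvpFirst_cons_neg xs hpm, fmvpCnt_cons_neg xs hpm]

-- the head of A's candidate list is B's first player at the max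
theorem fmvp_head (votes : List (String × Int)) (m : Int)
    (hmem : ∃ q ∈ votes, q.2 = m) :
    PySem.List.pyGet? ((votes.filter (fun p => p.2 = m)).map (·.1)) 0 =
      some (fmvpFirst votes m) := by
  have hsome : (votes.find? (fun p => decide (p.2 = m))).isSome := by
    rw [List.find?_isSome]
    obtain ⟨q, hq, hqv⟩ := hmem
    exact ⟨q, hq, by simp [hqv]⟩
  obtain ⟨p, hp⟩ := Option.isSome_iff_exists.mp hsome
  have hhead : ((votes.filter (fun p => p.2 = m)).map (·.1)).head? = some p.1 := by
    rw [List.head?_map, List.head?_filter, hp]; rfl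
  obtain ⟨tl, htl⟩ := List.head?_eq_some_iff.mp hhead
  rw [htl]
  simp [PySem.List.pyGet?, PySem.List.pyIdx?, fmvpFirst, hp]

-- ===== VERDICT (by name: the statement is the Claim_ definition above) =====
theorem find_most_voted_player_spec : Claim_equal_find_most_voted_player := by
  intro votes _
  unfold Spec_find_most_voted_player
  cases votes with
  | nil => rfl
  | cons v vs =>
    set M := fmvpMax vs v.2 with hMdef
    have hmax : PySem.List.max? ((v :: vs).map (·.2)) (fun y => y) = some M := by
      rw [List.map_cons, PySem.List.max?_id_cons]
      congr 1
      simp [hMdef, fmvpMax, List.foldl_map]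
    have hmem : ∃ q ∈ v :: vs, q.2 = M := by
      rcases fmvpMax_exists vs v.2 with h | ⟨p, hp, hpv⟩
      · exact ⟨v, List.mem_cons_self, h.symm⟩
      · exact ⟨p, List.mem_cons_of_mem v hp, hpv⟩
    have hfirst : (if M = v.2 then v.1 else fmvpFirst vs M) = fmvpFirst (v :: vs) M := by
      by_cases h : M = v.2
      · rw [if_pos h, fmvpFirst_cons_pos vs h.symm]
      · rw [if_neg h, fmvpFirst_cons_neg vs (fun e => h e.symm)]
    have hcnt : (if M = v.2 then (1 : Int) else 0) + fmvpCnt vs M = fmvpCnt (v :: vs) M := by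
      by_cases h : M = v.2
      · rw [if_pos h, fmvpCnt_cons_pos vs h.symm]
      · rw [if_neg h, fmvpCnt_cons_neg vs (fun e => h e.symm), zero_add]
    have hfold : (v :: vs).foldl fmvpStep (none, none, 0) =
        (some M, some (fmvpFirst (v :: vs) M), fmvpCnt (v :: vs) M) := by
      rw [List.foldl_cons]
      show vs.foldl fmvpStep (some v.2, some v.1, 1) = _
      rw [fmvp_fold_inv vs v.2 v.1 1, ← hMdef, hfirst, hcnt]
    unfold find_most_voted_player find_most_voted_player_alt
    simp only [if_neg (List.cons_ne_nil v vs), hmax, hfold]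
    rw [List.length_map]
    by_cases h0 : M = 0
    · simp [h0]
    · rw [if_neg h0, if_neg h0]
      by_cases h1 : fmvpCnt (v :: vs) M > 1
      · rw [if_pos h1, if_pos (show ((((v :: vs).filter (fun p => p.2 = M)).length : Int) > 1) from h1)]
      · rw [if_neg h1, if_neg (show ¬ ((((v :: vs).filter (fun p => p.2 = M)).length : Int) > 1) from h1)]
        exact fmvp_head (v :: vs) M hmem
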